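-- pv_equiv track=rewrite | github.com/sarugabriel2020/SAT-Solver | main.py | iterare
-- ===== SOURCE A (Python) =====
-- def iterare(nr_element, literals):
--     if nr_element == 1:
--         return literals
--     else:
--         return [y + x
--                 for y in iterare(1, literals)
--                 for x in iterare(nr_element - 1, literals)
--                 ]
-- ===== SOURCE B (Python) =====
-- def iterare(nr_element, literals):
--     res = literals
--     for _ in range(nr_element - 1):
--         res = [y + x for y in literals for x in res]
--     return res
-- ===== Notes on version B (the rewrite author's own statement) =====
-- stated objective: faster
-- what changed: replaces the recursion that recomputes iterare(nr_element-1, literals) once per outer literal by an iterative loop that builds each level exactly once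
import Mathlib
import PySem

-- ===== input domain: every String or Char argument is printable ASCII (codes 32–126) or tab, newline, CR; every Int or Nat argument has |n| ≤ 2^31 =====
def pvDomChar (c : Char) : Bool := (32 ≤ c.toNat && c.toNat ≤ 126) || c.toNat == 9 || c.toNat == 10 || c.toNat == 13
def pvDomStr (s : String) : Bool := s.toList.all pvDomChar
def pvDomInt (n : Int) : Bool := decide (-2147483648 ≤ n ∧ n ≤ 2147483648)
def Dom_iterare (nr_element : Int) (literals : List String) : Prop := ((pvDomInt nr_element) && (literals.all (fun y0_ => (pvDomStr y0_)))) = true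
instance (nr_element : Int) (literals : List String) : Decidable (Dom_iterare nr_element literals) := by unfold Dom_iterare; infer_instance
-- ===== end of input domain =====

-- B builds the levels iteratively, computing each level once instead of recomputing iterare(n-1) per outer literal.


-- ===== PORT A =====
-- fuel (= nr_element.toNat) only makes the recursion total; on Pre_ it never runs out
-- (for literals = [] the comprehension is empty without recursing, hence the [] at fuel 0).
def iterareGo (literals : List String) : Nat → Int → List String
  | fuel, n =>
    if n = 1 then literals
    else match fuel with
      | 0 => []
      | f + 1 =>
        (iterareGo literals f 1).flatMap
          (fun y => (iterareGo literals f (n - 1)).map (fun x => y ++ x))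

def iterare (nr_element : Int) (literals : List String) : List String :=
  iterareGo literals nr_element.toNat nr_element

-- ===== PORT B =====
def iterare_alt (nr_element : Int) (literals : List String) : List String :=
  (List.range (nr_element - 1).toNat).foldl
    (fun res _ => literals.flatMap (fun y => res.map (fun x => y ++ x))) literals

-- ===== PRECONDITION & SPEC =====
-- Pre_ excludes exactly nr_element ≤ 0 with nonempty literals, where A hits infinite recursion (RecursionError).
def Pre_iterare (nr_element : Int) (literals : List String) : Prop := 1 ≤ nr_element ∨ literals = []
instance (nr_element : Int) (literals : List String) : Decidable (Pre_iterare nr_element literals) := by unfold Pre_iterare; infer_instance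
def pvWitness_iterare : Int × List String := (2, ["a", "b"])
def Spec_iterare (nr_element : Int) (literals : List String) (out : List String) : Prop := out = iterare_alt nr_element literals
instance (nr_element : Int) (literals : List String) (out : List String) : Decidable (Spec_iterare nr_element literals out) := by unfold Spec_iterare; infer_instance

-- ===== CLAIM (what is proved, stated in full; the proofs are below) =====
def Claim_equal_iterare : Prop := ∀ (nr_element : Int) (literals : List String), Dom_iterare nr_element literals → Pre_iterare nr_element literals → Spec_iterare nr_element literals (iterare nr_element literals)

-- ===== LEMMAS AND PROOFS =====

def step (literals : List String) (res : List String) : List String :=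
  literals.flatMap (fun y => res.map (fun x => y ++ x))

theorem iterareGo_one (literals : List String) (fuel : Nat) :
    iterareGo literals fuel 1 = literals := by
  unfold iterareGo; simp

theorem iterareGo_nil (fuel : Nat) (n : Int) : iterareGo [] fuel n = [] := by
  unfold iterareGo
  split
  · rfl
  · match fuel with
    | 0 => rfl
    | f + 1 => simp [iterareGo_one]

-- with enough fuel, level k+1 is the k-fold iterate of one product step
theorem iterareGo_eq_iter (literals : List String) (k : Nat) :
    ∀ fuel, k ≤ fuel → iterareGo literals fuel ((k : Int) + 1) = (step literals)^[k] literals := by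
  induction k with
  | zero => intro fuel _; simpa using iterareGo_one literals fuel
  | succ k ih =>
    intro fuel hf
    match fuel, hf with
    | f + 1, hf =>
      have hk : k ≤ f := Nat.succ_le_succ_iff.mp hf
      have hne : ((k : Int) + 1 + 1) ≠ 1 := by omega
      unfold iterareGo
      push_cast
      rw [if_neg hne]
      have harg : ((k : Int) + 1 + 1) - 1 = (k : Int) + 1 := by ring
      rw [harg, ih f hk, iterareGo_one,
        Function.iterate_succ_apply' (step literals) k literals]
      rfl

theorem foldl_const_step (literals : List String) (k : Nat) (res : List String) :
    (List.range k).foldl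
      (fun res _ => literals.flatMap (fun y => res.map (fun x => y ++ x))) res
      = (step literals)^[k] res := by
  induction k with
  | zero => rfl
  | succ k ih =>
    rw [List.range_succ, List.foldl_append, ih, List.foldl_cons, List.foldl_nil,
      Function.iterate_succ_apply' (step literals) k res]
    rfl

theorem alt_nil (n : Int) : iterare_alt n [] = [] := by
  unfold iterare_alt
  generalize List.range (n - 1).toNat = l
  induction l with
  | nil => rfl
  | cons h t ih =>
    simp only [List.foldl_cons, List.flatMap_nil]
    generalize t.foldl _ [] = r at *
    -- after first step the accumulator is [] and stays []
    clear ih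
    induction t with
    | nil => rfl
    | cons h' t' ih' => simpa using ih'

-- ===== VERDICT (by name: the statement is the Claim_ definition above) =====
theorem iterare_spec : Claim_equal_iterare := by
  intro n literals _ hpre
  unfold Spec_iterare
  rcases hpre with h1 | hnil
  · obtain ⟨k, hn⟩ : ∃ k : Nat, n = (k : Int) + 1 := ⟨(n - 1).toNat, by omega⟩
    subst hn
    unfold iterare iterare_alt
    have h1 : ((k : Int) + 1).toNat = k + 1 := by omega
    have h2 : ((k : Int) + 1 - 1).toNat = k := by omega
    rw [h1, h2, iterareGo_eq_iter literals k (k + 1) (by omega), foldl_const_step]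
  · subst hnil
    rw [alt_nil]
    unfold iterare
    exact iterareGo_nil _ _
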